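-- pv_equiv track=rewrite | github.com/Shikhar28-web/Financial-Report-Analysis-System | retrieval/agents/retriever_agent.py | find_matching_field
-- ===== SOURCE A (Python) =====
-- def find_matching_field(query_lower, field_name):
--     """Check if a field name semantically matches the query with improved matching."""
--     field_lower = field_name.lower()
--
--     # Direct matches
--     if query_lower in field_lower or field_lower in query_lower:
--         return True
--
--     # Word-level matches
--     query_words = set(query_lower.split())
--     field_words = set(field_lower.split())
--     if query_words.intersection(field_words):
--         return True
--
--     # Semantic matches for common fields (expanded)
--     semantic_map = {
--         'revenue': ['revenue', 'gross sales', 'income', 'sales', 'gross', 'earnings'],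
--         'profit': ['profit', 'net income', 'earnings', 'income', 'net profit', 'bottom line'],
--         'sales': ['sales', 'revenue', 'gross sales', 'gross', 'turnover'],
--         'country': ['country', 'nation', 'region', 'location', 'territory'],
--         'product': ['product', 'item', 'goods', 'merchandise', 'sku', 'article'],
--         'units': ['units', 'quantity', 'count', 'number', 'qty', 'amount'],
--         'price': ['price', 'cost', 'amount', 'value', 'rate', 'fee'],
--         'date': ['date', 'time', 'period', 'year', 'month', 'day', 'quarter'],
--         'customer': ['customer', 'client', 'buyer', 'purchaser'],
--         'category': ['category', 'type', 'class', 'group', 'segment', 'division']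
--     }
--
--     for key, synonyms in semantic_map.items():
--         # Check if query contains any synonym and field contains any synonym
--         query_has_syn = any(syn in query_lower for syn in synonyms)
--         field_has_syn = any(syn in field_lower for syn in synonyms)
--         if query_has_syn and field_has_syn:
--             return True
--
--     return False
-- ===== SOURCE B (Python) =====
-- # B: or-chain of three staged predicates; the semantic stage uses a precomputed
-- # inverted synonym->categories index literal, intersecting the category sets hit
-- # by the query and the field (objective: alternative decomposition).
--
-- _SYN_CATS = {
--     'revenue': ['revenue', 'sales'],
--     'gross sales': ['revenue', 'sales'],
--     'income': ['revenue', 'profit'],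
--     'sales': ['revenue', 'sales'],
--     'gross': ['revenue', 'sales'],
--     'earnings': ['revenue', 'profit'],
--     'profit': ['profit'],
--     'net income': ['profit'],
--     'net profit': ['profit'],
--     'bottom line': ['profit'],
--     'turnover': ['sales'],
--     'country': ['country'],
--     'nation': ['country'],
--     'region': ['country'],
--     'location': ['country'],
--     'territory': ['country'],
--     'product': ['product'],
--     'item': ['product'],
--     'goods': ['product'],
--     'merchandise': ['product'],
--     'sku': ['product'],
--     'article': ['product'],
--     'units': ['units'],
--     'quantity': ['units'],
--     'count': ['units'],
--     'number': ['units'],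
--     'qty': ['units'],
--     'amount': ['units', 'price'],
--     'price': ['price'],
--     'cost': ['price'],
--     'value': ['price'],
--     'rate': ['price'],
--     'fee': ['price'],
--     'date': ['date'],
--     'time': ['date'],
--     'period': ['date'],
--     'year': ['date'],
--     'month': ['date'],
--     'day': ['date'],
--     'quarter': ['date'],
--     'customer': ['customer'],
--     'client': ['customer'],
--     'buyer': ['customer'],
--     'purchaser': ['customer'],
--     'category': ['category'],
--     'type': ['category'],
--     'class': ['category'],
--     'group': ['category'],
--     'segment': ['category'],
--     'division': ['category'],
-- }
--
--
-- def _cats(text):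
--     """Categories whose synonym list has a member occurring in text."""
--     return {c for syn, cs in _SYN_CATS.items() if syn in text for c in cs}
--
--
-- def find_matching_field(query_lower, field_name):
--     field_lower = field_name.lower()
--     return (query_lower in field_lower
--             or field_lower in query_lower
--             or not set(query_lower.split()).isdisjoint(field_lower.split())
--             or not _cats(query_lower).isdisjoint(_cats(field_lower)))
-- ===== Notes on version B (the rewrite author's own statement) =====
-- stated objective: alternative
-- what changed: The if/elif return-True chain becomes a single or-chain of staged predicates, and the semantic stage's key-major loop (for each category, a conjoined any-synonym-in-query and any-synonym-in-field scan) is replaced by a precomputed literal inverted index synonym -> categories: a helper collects the category set hit by each string in one comprehension and the result is whether the two sets intersect.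
import Mathlib
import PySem

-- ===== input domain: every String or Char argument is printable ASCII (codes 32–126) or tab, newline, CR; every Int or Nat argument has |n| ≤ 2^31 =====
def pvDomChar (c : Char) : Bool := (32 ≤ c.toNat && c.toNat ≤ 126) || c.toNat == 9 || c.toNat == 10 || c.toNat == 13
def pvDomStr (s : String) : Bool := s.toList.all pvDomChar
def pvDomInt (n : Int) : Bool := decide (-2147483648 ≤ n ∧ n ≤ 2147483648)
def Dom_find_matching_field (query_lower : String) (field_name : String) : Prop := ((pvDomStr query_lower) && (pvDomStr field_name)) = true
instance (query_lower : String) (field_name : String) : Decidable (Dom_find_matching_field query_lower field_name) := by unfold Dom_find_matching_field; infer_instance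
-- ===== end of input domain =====

-- B replaces A's if-chain with an or-chain of staged predicates, and A's key-major semantic
-- loop (per-category joint any/any scan) by a precomputed inverted synonym->categories index:
-- the category sets hit by query and field are collected and intersected (objective: alternative).

-- ===== PORT A =====
-- A's literal semantic_map (dict with distinct literal keys -> its items() list)
def semanticMapA : List (String × List String) :=
  [("revenue", ["revenue", "gross sales", "income", "sales", "gross", "earnings"]),
   ("profit", ["profit", "net income", "earnings", "income", "net profit", "bottom line"]),
   ("sales", ["sales", "revenue", "gross sales", "gross", "turnover"]),
   ("country", ["country", "nation", "region", "location", "territory"]),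
   ("product", ["product", "item", "goods", "merchandise", "sku", "article"]),
   ("units", ["units", "quantity", "count", "number", "qty", "amount"]),
   ("price", ["price", "cost", "amount", "value", "rate", "fee"]),
   ("date", ["date", "time", "period", "year", "month", "day", "quarter"]),
   ("customer", ["customer", "client", "buyer", "purchaser"]),
   ("category", ["category", "type", "class", "group", "segment", "division"])]

def find_matching_field (query_lower : String) (field_name : String) : Bool :=
  let field_lower := PySem.Str.lower field_name
  -- Direct matches
  if PySem.Str.isIn query_lower field_lower || PySem.Str.isIn field_lower query_lower then true
  else
    -- Word-level matches (set truthiness = nonempty intersection)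
    let query_words : PySem.Set String := PySem.Set.ofList (PySem.Str.split₀ query_lower)
    let field_words : PySem.Set String := PySem.Set.ofList (PySem.Str.split₀ field_lower)
    if !(PySem.Set.inter query_words field_words).isEmpty then true
    else
      -- for key, synonyms in semantic_map.items(): early return -> List.any
      semanticMapA.any (fun p =>
        let query_has_syn := p.2.any (fun syn => PySem.Str.isIn syn query_lower)
        let field_has_syn := p.2.any (fun syn => PySem.Str.isIn syn field_lower)
        query_has_syn && field_has_syn)

-- ===== PORT B =====
-- Source B's literal _SYN_CATS inverted index (synonym -> categories), items() order
def synCatsB : List (String × List String) :=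
  [("revenue", ["revenue", "sales"]), ("gross sales", ["revenue", "sales"]),
   ("income", ["revenue", "profit"]), ("sales", ["revenue", "sales"]),
   ("gross", ["revenue", "sales"]), ("earnings", ["revenue", "profit"]),
   ("profit", ["profit"]), ("net income", ["profit"]), ("net profit", ["profit"]),
   ("bottom line", ["profit"]), ("turnover", ["sales"]),
   ("country", ["country"]), ("nation", ["country"]), ("region", ["country"]),
   ("location", ["country"]), ("territory", ["country"]),
   ("product", ["product"]), ("item", ["product"]), ("goods", ["product"]),
   ("merchandise", ["product"]), ("sku", ["product"]), ("article", ["product"]),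
   ("units", ["units"]), ("quantity", ["units"]), ("count", ["units"]),
   ("number", ["units"]), ("qty", ["units"]), ("amount", ["units", "price"]),
   ("price", ["price"]), ("cost", ["price"]), ("value", ["price"]),
   ("rate", ["price"]), ("fee", ["price"]),
   ("date", ["date"]), ("time", ["date"]), ("period", ["date"]), ("year", ["date"]),
   ("month", ["date"]), ("day", ["date"]), ("quarter", ["date"]),
   ("customer", ["customer"]), ("client", ["customer"]), ("buyer", ["customer"]),
   ("purchaser", ["customer"]),
   ("category", ["category"]), ("type", ["category"]), ("class", ["category"]),
   ("group", ["category"]), ("segment", ["category"]), ("division", ["category"])]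

-- _cats(text): set comprehension = set of the flattened filtered category lists
def catsOf (text : String) : PySem.Set String :=
  PySem.Set.ofList (synCatsB.flatMap (fun p => if PySem.Str.isIn p.1 text then p.2 else []))

def find_matching_field_alt (query_lower : String) (field_name : String) : Bool :=
  let field_lower := PySem.Str.lower field_name
  PySem.Str.isIn query_lower field_lower
    || PySem.Str.isIn field_lower query_lower
    || !(PySem.Set.isdisjoint (PySem.Set.ofList (PySem.Str.split₀ query_lower))
          (PySem.Str.split₀ field_lower))
    || !(PySem.Set.isdisjoint (catsOf query_lower) (catsOf field_lower))

-- ===== PRECONDITION & SPEC =====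
def Spec_find_matching_field (query_lower : String) (field_name : String) (out : Bool) : Prop := out = find_matching_field_alt query_lower field_name
instance (query_lower : String) (field_name : String) (out : Bool) : Decidable (Spec_find_matching_field query_lower field_name out) := by unfold Spec_find_matching_field; infer_instance

-- ===== CLAIM (what is proved, stated in full; the proofs are below) =====
def Claim_equal_find_matching_field : Prop := ∀ (query_lower : String) (field_name : String), Dom_find_matching_field query_lower field_name → Spec_find_matching_field query_lower field_name (find_matching_field query_lower field_name)

-- ===== LEMMAS AND PROOFS =====

-- (synonym, key) pairs induced by A's map and by B's inverted index
def pairsM : List (String × String) := semanticMapA.flatMap (fun p => p.2.map (fun s => (s, p.1)))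
def pairsI : List (String × String) := synCatsB.flatMap (fun p => p.2.map (fun c => (p.1, c)))

set_option maxRecDepth 40000 in
lemma pairs_subsets : pairsI ⊆ pairsM ∧ pairsM ⊆ pairsI := by decide

lemma mem_pairsI_iff_pairsM (x : String × String) : x ∈ pairsI ↔ x ∈ pairsM :=
  ⟨fun h => pairs_subsets.1 h, fun h => pairs_subsets.2 h⟩

set_option maxRecDepth 40000 in
lemma keys_nodup : (semanticMapA.map Prod.fst).Nodup := by decide

-- membership in a _cats set
lemma mem_catsOf (t : String) (c : String) :
    c ∈ catsOf t ↔ ∃ s, (s, c) ∈ pairsI ∧ PySem.Str.isIn s t = true := by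
  unfold catsOf
  rw [PySem.Set.mem_ofList, List.mem_flatMap]
  constructor
  · rintro ⟨p, hp, hc⟩
    by_cases h : PySem.Str.isIn p.1 t = true
    · refine ⟨p.1, ?_, h⟩
      simp only [pairsI, List.mem_flatMap, List.mem_map]
      have : c ∈ p.2 := by rwa [if_pos h] at hc
      exact ⟨p, hp, c, this, rfl⟩
    · rw [if_neg h] at hc
      exact absurd hc (List.not_mem_nil)
  · rintro ⟨s, hsc, hs⟩
    simp only [pairsI, List.mem_flatMap, List.mem_map] at hsc
    obtain ⟨p, hp, c', hc', heq⟩ := hsc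
    injection heq with h1 h2
    subst h1; subst h2
    refine ⟨p, hp, ?_⟩
    rw [if_pos hs]
    exact hc'

-- a non-disjointness test = nonempty intersection witness
lemma not_isdisjoint_iff (a : PySem.Set String) (b : List String) :
    ((!(PySem.Set.isdisjoint a b)) = true) ↔ ∃ k, k ∈ a ∧ k ∈ b := by
  rw [Bool.not_eq_eq_eq_not, Bool.not_true, ← Bool.not_eq_true,
    PySem.Set.isdisjoint_iff]
  push Not
  rfl

-- A's word-intersection truthiness = B's isdisjoint form
lemma words_eq (q fl : String) :
    (!(PySem.Set.inter (PySem.Set.ofList (PySem.Str.split₀ q))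
        (PySem.Set.ofList (PySem.Str.split₀ fl))).isEmpty) =
    (!(PySem.Set.isdisjoint (PySem.Set.ofList (PySem.Str.split₀ q))
        (PySem.Str.split₀ fl))) := by
  rw [Bool.eq_iff_iff, not_isdisjoint_iff,
    Bool.not_eq_eq_eq_not, Bool.not_true, List.isEmpty_eq_false_iff_exists_mem]
  constructor
  · rintro ⟨k, hk⟩
    have := (PySem.Set.mem_inter _ _ _).1 hk
    exact ⟨k, this.1, (PySem.Set.mem_ofList _ _).1 this.2⟩
  · rintro ⟨k, h1, h2⟩
    exact ⟨k, (PySem.Set.mem_inter _ _ _).2 ⟨h1, (PySem.Set.mem_ofList _ _).2 h2⟩⟩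

-- the semantic stages agree
lemma sem_eq (q fl : String) :
    (semanticMapA.any (fun p =>
        let query_has_syn := p.2.any (fun syn => PySem.Str.isIn syn q)
        let field_has_syn := p.2.any (fun syn => PySem.Str.isIn syn fl)
        query_has_syn && field_has_syn)) =
    (!(PySem.Set.isdisjoint (catsOf q) (catsOf fl))) := by
  rw [Bool.eq_iff_iff, not_isdisjoint_iff, List.any_eq_true]
  constructor
  · rintro ⟨p, hp, hqf⟩
    simp only [Bool.and_eq_true, List.any_eq_true] at hqf
    obtain ⟨⟨s, hs, hQ⟩, ⟨s', hs', hF⟩⟩ := hqf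
    refine ⟨p.1, ?_, ?_⟩
    · rw [mem_catsOf]
      refine ⟨s, ?_, hQ⟩
      rw [mem_pairsI_iff_pairsM]
      simp only [pairsM, List.mem_flatMap, List.mem_map]
      exact ⟨p, hp, s, hs, rfl⟩
    · rw [mem_catsOf]
      refine ⟨s', ?_, hF⟩
      rw [mem_pairsI_iff_pairsM]
      simp only [pairsM, List.mem_flatMap, List.mem_map]
      exact ⟨p, hp, s', hs', rfl⟩
  · rintro ⟨k, hq, hf⟩
    rw [mem_catsOf] at hq hf
    obtain ⟨s, hsk, hQ⟩ := hq
    obtain ⟨s', hsk', hF⟩ := hf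
    rw [mem_pairsI_iff_pairsM] at hsk hsk'
    simp only [pairsM, List.mem_flatMap, List.mem_map] at hsk hsk'
    obtain ⟨p, hp, u, hu, hequ⟩ := hsk
    obtain ⟨p', hp', u', hu', hequ'⟩ := hsk'
    injection hequ with e1 e2
    injection hequ' with e1' e2'
    rw [e1] at hu
    rw [e1'] at hu'
    have hpp' : p = p' :=
      List.inj_on_of_nodup_map keys_nodup hp hp' (e2.trans e2'.symm)
    refine ⟨p, hp, ?_⟩
    simp only [Bool.and_eq_true, List.any_eq_true]
    exact ⟨⟨s, hu, hQ⟩, ⟨s', hpp' ▸ hu', hF⟩⟩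

-- ===== VERDICT (by name: the statement is the Claim_ definition above) =====
theorem find_matching_field_spec : Claim_equal_find_matching_field := by
  intro q f _
  unfold Spec_find_matching_field find_matching_field find_matching_field_alt
  dsimp only
  by_cases ha : PySem.Str.isIn q (PySem.Str.lower f) = true
  · rw [ha]; simp
  · by_cases hb : PySem.Str.isIn (PySem.Str.lower f) q = true
    · rw [hb]; simp
    · rw [Bool.not_eq_true] at ha hb
      simp only [ha, hb, Bool.false_or, Bool.false_eq_true, if_false]
      rw [words_eq q (PySem.Str.lower f)]
      by_cases h2 : (!(PySem.Set.isdisjoint (PySem.Set.ofList (PySem.Str.split₀ q))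
            (PySem.Str.split₀ (PySem.Str.lower f)))) = true
      · simp [h2]
      · rw [Bool.not_eq_true] at h2
        simp only [h2, Bool.false_or, Bool.false_eq_true, if_false]
        exact sem_eq q (PySem.Str.lower f)
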